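-- pv_equiv track=rewrite | github.com/jk-jung/problem-solving | codewars/6kyu/6_Find Amount of Certain Combinations than its Sum of Elements Are Within a Given Range.py | find_comb_noncontig
-- ===== SOURCE A (Python) =====
-- def find_comb_noncontig(v, t, q):
--     r = 0
--     for i in range(1, 1 << len(v)):
--         if (i * 2) & i: continue
--
--         s = 0
--         for k in range(len(v)):
--             if i >> k & 1:
--                 s += v[k]
--         r += t - q <= s <= t + q
--     return r
-- ===== SOURCE B (Python) =====
-- def find_comb_noncontig(v, t, q):
--     # Suffix DP: s1 = sums of nonempty non-adjacent subsets of v[i:], s2 = same for v[i+1:].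
--     # Only ~phi^n such subsets exist, vs 2^n masks scanned by the original.
--     s1, s2 = [], []
--     for x in reversed(v):
--         s1, s2 = s1 + [x] + [x + s for s in s2], s1
--     return sum(1 for s in s1 if t - q <= s <= t + q)
-- ===== Notes on version B (the rewrite author's own statement) =====
-- stated objective: faster
-- what changed: Instead of scanning all 2^n bitmasks and rejecting those with adjacent bits, B builds the multiset of non-adjacent-subset sums by a right-to-left suffix recurrence (S_i = S_{i+1} + [v_i] + v_i+S_{i+2}), whose size is only Fibonacci(~1.618^n), then counts sums in range.
import Mathlib
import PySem

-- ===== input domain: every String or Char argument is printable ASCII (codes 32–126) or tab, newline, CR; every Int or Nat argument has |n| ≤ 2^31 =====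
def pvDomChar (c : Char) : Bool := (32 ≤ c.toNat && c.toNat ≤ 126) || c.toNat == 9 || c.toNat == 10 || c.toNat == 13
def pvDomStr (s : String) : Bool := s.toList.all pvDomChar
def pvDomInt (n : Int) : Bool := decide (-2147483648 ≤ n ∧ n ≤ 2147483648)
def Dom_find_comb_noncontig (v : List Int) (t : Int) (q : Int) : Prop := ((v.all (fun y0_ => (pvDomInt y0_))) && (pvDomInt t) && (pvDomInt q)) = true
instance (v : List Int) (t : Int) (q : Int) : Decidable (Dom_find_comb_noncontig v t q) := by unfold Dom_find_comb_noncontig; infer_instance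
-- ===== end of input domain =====

-- B replaces A's scan of all 2^n bitmasks by a right-to-left suffix recurrence that only ever
-- materialises the (Fibonacci-many) non-adjacent subset sums; objective: faster.

-- ===== PORT A =====
def find_comb_noncontig (v : List Int) (t : Int) (q : Int) : Int :=
  (PySem.List.pyRange 1 ((1:Int) <<< v.length) 1).foldl (fun r i =>
    if PySem.Int.band (i * 2) i ≠ 0 then r
    else
      let s := (PySem.List.pyRange 0 (PySem.List.len v) 1).foldl (fun s k =>
        -- Python's `i >> k & 1`: k ≥ 0 here, so `k.toNat` is exact
        if PySem.Int.band (i >>> k.toNat) 1 ≠ 0 then s + PySem.List.pyGetD v k 0 else s) 0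
      r + (if t - q ≤ s ∧ s ≤ t + q then 1 else 0)) 0

-- ===== PORT B =====
def find_comb_noncontig_alt (v : List Int) (t : Int) (q : Int) : Int :=
  let p := v.reverse.foldl (fun (p : List Int × List Int) x =>
      (p.1 ++ [x] ++ p.2.map (fun s => x + s), p.1)) ([], [])
  ((p.1.filter (fun s => decide (t - q ≤ s ∧ s ≤ t + q))).length : Int)

-- ===== PRECONDITION & SPEC =====
def Spec_find_comb_noncontig (v : List Int) (t : Int) (q : Int) (out : Int) : Prop := out = find_comb_noncontig_alt v t q
instance (v : List Int) (t : Int) (q : Int) (out : Int) : Decidable (Spec_find_comb_noncontig v t q out) := by unfold Spec_find_comb_noncontig; infer_instance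

-- ===== CLAIM (what is proved, stated in full; the proofs are below) =====
def Claim_equal_find_comb_noncontig : Prop := ∀ (v : List Int) (t : Int) (q : Int), Dom_find_comb_noncontig v t q → Spec_find_comb_noncontig v t q (find_comb_noncontig v t q)

-- ===== LEMMAS AND PROOFS =====

-- multiset of sums of the nonempty non-adjacent subsets of v (B's s1 accumulator)
def nsums : List Int → List Int
  | [] => []
  | [x] => [x]
  | x :: y :: r => nsums (y :: r) ++ [x] ++ (nsums r).map (fun s => x + s)

lemma nsums_cons (x : Int) (r : List Int) :
    nsums (x :: r) = nsums r ++ [x] ++ (nsums r.tail).map (fun s => x + s) := by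
  cases r <;> simp [nsums]

-- sum of the subset of v selected by the low bits of m (A's inner loop, bit view)
def bitsum : List Int → Nat → Int
  | [], _ => 0
  | x :: r, m => (if m % 2 = 1 then x else 0) + bitsum r (m / 2)

lemma bitsum_zero (v : List Int) : bitsum v 0 = 0 := by
  induction v with
  | nil => rfl
  | cons x r ih => simp [bitsum, ih]

lemma bitsum_double (x : Int) (r : List Int) (j : Nat) :
    bitsum (x :: r) (2 * j) = bitsum r j := by
  have h1 : 2 * j % 2 = 0 := by omega
  have h2 : 2 * j / 2 = j := by omega
  simp [bitsum, h1, h2]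

lemma bitsum_4m1 (x y : Int) (r : List Int) (m : Nat) :
    bitsum (x :: y :: r) (4 * m + 1) = x + bitsum r m := by
  have h1 : (4 * m + 1) % 2 = 1 := by omega
  have h2 : (4 * m + 1) / 2 = 2 * m := by omega
  have h3 : 2 * m % 2 = 0 := by omega
  have h4 : 2 * m / 2 = m := by omega
  simp [bitsum, h1, h2, h3, h4]

-- B's pair fold computes (nsums v, nsums v.tail)
lemma pairfold (v : List Int) :
    v.foldr (fun x (p : List Int × List Int) => (p.1 ++ [x] ++ p.2.map (fun s => x + s), p.1)) ([], [])
      = (nsums v, nsums v.tail) := by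
  induction v with
  | nil => simp [nsums]
  | cons x v ih => rw [List.foldr_cons, ih, nsums_cons, List.tail_cons]

lemma B_eq (v : List Int) (t q : Int) :
    find_comb_noncontig_alt v t q
      = ((nsums v).countP (fun s => decide (t - q ≤ s ∧ s ≤ t + q)) : Int) := by
  unfold find_comb_noncontig_alt
  rw [List.foldl_reverse, pairfold]
  simp [List.countP_eq_length_filter]

-- bit arithmetic helpers
lemma testBit_div (m k : Nat) : Nat.testBit m k = decide (m / 2 ^ k % 2 = 1) := by
  induction k generalizing m with
  | zero => simp [Nat.testBit_zero]
  | succ k ih =>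
    have h : m / 2 / 2 ^ k = m / 2 ^ (k + 1) := by
      rw [Nat.div_div_eq_div_mul]; congr 1; ring
    rw [Nat.testBit_add_one, ih, h]

lemma tb1 (m k : Nat) : ((m >>> k) &&& 1 ≠ 0) ↔ Nat.testBit m k = true := by
  rw [Nat.and_one_is_mod, Nat.shiftRight_eq_div_pow, testBit_div]
  simp

lemma land_two_mul (a b : Nat) : (2 * a) &&& (2 * b) = 2 * (a &&& b) := by
  apply Nat.eq_of_testBit_eq
  intro i
  match i with
  | 0 =>
    have h1 : 2 * a % 2 = 0 := by omega
    have h2 : 2 * (a &&& b) % 2 = 0 := by omega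
    simp [Nat.testBit_land, Nat.testBit_zero, h1, h2]
  | i + 1 =>
    have h1 : 2 * a / 2 = a := by omega
    have h2 : 2 * b / 2 = b := by omega
    have h3 : 2 * (a &&& b) / 2 = a &&& b := by omega
    rw [Nat.testBit_land, Nat.testBit_add_one, Nat.testBit_add_one, Nat.testBit_add_one,
        h1, h2, h3, ← Nat.testBit_land]

lemma land_8m2 (m : Nat) : (8 * m + 2) &&& (4 * m + 1) = 4 * ((2 * m) &&& m) := by
  apply Nat.eq_of_testBit_eq
  intro i
  match i with
  | 0 =>
    have h1 : (8 * m + 2) % 2 = 0 := by omega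
    have h2 : 4 * ((2 * m) &&& m) % 2 = 0 := by omega
    simp [Nat.testBit_land, Nat.testBit_zero, h1, h2]
  | 1 =>
    have e1 : (8 * m + 2) / 2 = 4 * m + 1 := by omega
    have e2 : (4 * m + 1) / 2 = 2 * m := by omega
    have e3 : 4 * ((2 * m) &&& m) / 2 = 2 * ((2 * m) &&& m) := by omega
    have o1 : (4 * m + 1) % 2 = 1 := by omega
    have o2 : 2 * m % 2 = 0 := by omega
    have o3 : 2 * ((2 * m) &&& m) % 2 = 0 := by omega
    rw [Nat.testBit_land, Nat.testBit_add_one, Nat.testBit_add_one, Nat.testBit_add_one,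
        e1, e2, e3]
    simp [Nat.testBit_zero, o1, o2, o3]
  | i + 2 =>
    have h1 : (8 * m + 2) / 2 / 2 = 2 * m := by omega
    have h2 : (4 * m + 1) / 2 / 2 = m := by omega
    have h3 : 4 * ((2 * m) &&& m) / 2 / 2 = (2 * m) &&& m := by omega
    rw [Nat.testBit_land, Nat.testBit_add_one, Nat.testBit_add_one,
        Nat.testBit_add_one, Nat.testBit_add_one, Nat.testBit_add_one, Nat.testBit_add_one,
        h1, h2, h3, ← Nat.testBit_land]

lemma noAdj_4m3 (m : Nat) : ¬ ((4 * m + 3) * 2 &&& (4 * m + 3) = 0) := by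
  intro h
  have hbit : ((4 * m + 3) * 2 &&& (4 * m + 3)).testBit 1 = false := by
    rw [h]; exact Nat.zero_testBit 1
  rw [Nat.testBit_land] at hbit
  have e1 : (4 * m + 3) * 2 / 2 = 4 * m + 3 := by omega
  have e2 : (4 * m + 3) / 2 = 2 * m + 1 := by omega
  rw [Nat.testBit_add_one, Nat.testBit_add_one, e1, e2] at hbit
  have o1 : (4 * m + 3) % 2 = 1 := by omega
  have o2 : (2 * m + 1) % 2 = 1 := by omega
  simp [Nat.testBit_zero, o1, o2] at hbit

-- splitting a count over range(2N) by parity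
lemma countRange2 (N : Nat) (Q : Nat → Bool) :
    (List.range (2 * N)).countP Q
      = (List.range N).countP (fun j => Q (2 * j)) + (List.range N).countP (fun j => Q (2 * j + 1)) := by
  induction N with
  | zero => simp
  | succ N ih =>
    rw [show List.range (2 * (N + 1)) = (List.range (2 * N) ++ [2 * N]) ++ [2 * N + 1] from by
          rw [show 2 * (N + 1) = (2 * N + 1) + 1 from by omega, List.range_succ, List.range_succ],
        show List.range (N + 1) = List.range N ++ [N] from List.range_succ]
    simp only [List.countP_append, ih, List.countP_cons, List.countP_nil]
    split_ifs <;> omega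

-- A's inner loop (named for the proofs)
def sInner (v : List Int) (i : Int) : Int :=
  (PySem.List.pyRange 0 (PySem.List.len v) 1).foldl (fun s k =>
    if PySem.Int.band (i >>> k.toNat) 1 ≠ 0 then s + PySem.List.pyGetD v k 0 else s) 0

lemma sfold (v : List Int) (m : Nat) (init : Int) :
    (List.range v.length).foldl (fun s k => if Nat.testBit m k then s + v.getD k 0 else s) init
      = init + bitsum v m := by
  induction v generalizing m init with
  | nil => simp [bitsum]
  | cons x r ih =>
    rw [List.length_cons, List.range_succ_eq_map, List.foldl_cons, List.foldl_map]
    have hfun : (fun (s : Int) (k : Nat) => if Nat.testBit m (Nat.succ k) then s + (x :: r).getD (Nat.succ k) 0 else s)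
        = (fun (s : Int) (k : Nat) => if Nat.testBit (m / 2) k then s + r.getD k 0 else s) := by
      funext s k
      rw [Nat.succ_eq_add_one, Nat.testBit_add_one]
      simp [List.getD_cons_succ]
    rw [hfun, ih]
    rw [Nat.testBit_zero]
    by_cases h : m % 2 = 1 <;> simp [bitsum, h] <;> ring

lemma sInner_eq (v : List Int) (m : Nat) : sInner v ((m : Nat) : Int) = bitsum v m := by
  unfold sInner
  rw [PySem.List.len_eq, PySem.List.pyRange_zero_nat, List.foldl_map]
  rw [PySem.List.foldl_congr_mem _ _
      (fun (s : Int) (k : Nat) => if Nat.testBit m k then s + v.getD k 0 else s) 0 ?_]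
  · rw [sfold]; ring
  · intro acc k _
    simp only [Int.toNat_natCast]
    have hsh : ((m : Int) >>> ((k : Nat) : Int)) = (((m >>> k : Nat)) : Int) := by
      simp [Int.natCast_shiftRight]
    have hband : PySem.Int.band (((m >>> k : Nat)) : Int) 1 = (((m >>> k) &&& 1 : Nat) : Int) := by
      exact_mod_cast PySem.Int.band_natCast (m >>> k) 1
    simp only [hsh, hband, PySem.List.pyGetD_natCast]
    by_cases h : (m >>> k) &&& 1 ≠ 0
    · rw [if_pos (by exact_mod_cast h), if_pos ((tb1 m k).mp h)]
    · rw [if_neg (by exact_mod_cast h), if_neg (by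
        intro hc
        exact h ((tb1 m k).mpr hc))]

-- A's per-mask contribution
def gA (v : List Int) (t q : Int) (i : Int) : Int :=
  if PySem.Int.band (i * 2) i ≠ 0 then 0
  else if t - q ≤ sInner v i ∧ sInner v i ≤ t + q then 1 else 0

-- A's per-mask contribution, bit view
def QN (v : List Int) (t q : Int) (m : Nat) : Bool :=
  decide (m * 2 &&& m = 0) && decide (t - q ≤ bitsum v m ∧ bitsum v m ≤ t + q)

lemma gA_natCast (v : List Int) (t q : Int) (m : Nat) :
    gA v t q ((m : Nat) : Int) = if QN v t q m then 1 else 0 := by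
  have hcast : ((m : Int) * 2) = (((m * 2 : Nat)) : Int) := by push_cast; ring
  have hband : PySem.Int.band (((m * 2 : Nat)) : Int) ((m : Nat) : Int)
      = (((m * 2 &&& m : Nat)) : Int) := PySem.Int.band_natCast (m * 2) m
  unfold gA QN
  rw [hcast, hband, sInner_eq]
  by_cases h1 : m * 2 &&& m = 0 <;>
    by_cases h2 : t - q ≤ bitsum v m ∧ bitsum v m ≤ t + q <;>
      simp [h1, h2]

lemma A_eq (v : List Int) (t q : Int) :
    find_comb_noncontig v t q
      = ((List.range (2 ^ v.length - 1)).countP (fun k => QN v t q (k + 1)) : Int) := by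
  unfold find_comb_noncontig
  rw [PySem.List.foldl_congr_mem _ _ (fun (r i : Int) => r + gA v t q i) 0 ?_]
  · rw [PySem.List.foldl_add _ (gA v t q) 0, zero_add]
    rw [show ((1:Int) <<< v.length) = 2 ^ v.length from by simp [Int.shiftLeft_eq]]
    rw [PySem.List.pyRange_one, List.map_map]
    have hN : (((2:Int) ^ v.length) - 1).toNat = 2 ^ v.length - 1 := by
      have h : ((2:Int) ^ v.length) = ((2 ^ v.length : Nat) : Int) := by push_cast; ring
      omega
    rw [hN]
    rw [List.map_congr_left (g := fun k => if QN v t q (k + 1) then (1:Int) else 0) ?_]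
    · rw [PySem.List.sum_map_ite_one_zero]
    · intro k _
      have : ((1:Int) + (k : Nat)) = (((k + 1 : Nat)) : Int) := by push_cast; ring
      simp only [Function.comp_apply, this, gA_natCast]
  · intro acc i _
    by_cases h : PySem.Int.band (i * 2) i ≠ 0 <;> simp [gA, sInner, h]

-- the combinatorial core: masks without adjacent bits ↔ non-adjacent subsets
lemma master : ∀ (v : List Int) (P : Int → Bool),
    (List.range (2 ^ v.length)).countP (fun m => decide (m * 2 &&& m = 0) && P (bitsum v m))
      = (nsums v).countP P + (if P 0 then 1 else 0)
  | [], P => by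
    simp only [List.length_nil, pow_zero, List.range_one, nsums, List.countP_nil,
      List.countP_cons, bitsum]
    simp
  | [x], P => by
    have hb1 : bitsum [x] 1 = x := by simp [bitsum]
    simp only [List.length_cons, List.length_nil, zero_add, pow_one]
    rw [show List.range 2 = [0, 1] from rfl]
    simp only [List.countP_cons, List.countP_nil, nsums]
    simp [bitsum_zero, hb1]
  | x :: y :: r, P => by
    have ih1 := master (y :: r) P
    have ih2 := master r (fun s => P (x + s))
    simp only [add_zero] at ih2
    rw [show (2:Nat) ^ (x :: y :: r).length = 2 * (2 ^ ((y :: r).length)) from by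
      simp [List.length_cons]; ring]
    rw [countRange2]
    have heven : (List.range (2 ^ (y :: r).length)).countP
        (fun j => decide ((2 * j) * 2 &&& (2 * j) = 0) && P (bitsum (x :: y :: r) (2 * j)))
        = (nsums (y :: r)).countP P + (if P 0 then 1 else 0) := by
      rw [List.countP_congr ?_]
      · exact ih1
      · intro j _
        rw [show (2 * j) * 2 = 2 * (j * 2) from by ring, land_two_mul, bitsum_double]
        rw [decide_eq_decide.mpr (show 2 * (j * 2 &&& j) = 0 ↔ j * 2 &&& j = 0 from by omega)]
    have hodd : (List.range (2 ^ (y :: r).length)).countP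
        (fun j => decide ((2 * j + 1) * 2 &&& (2 * j + 1) = 0) && P (bitsum (x :: y :: r) (2 * j + 1)))
        = (nsums r).countP (fun s => P (x + s)) + (if P x then 1 else 0) := by
      rw [show (2:Nat) ^ (y :: r).length = 2 * 2 ^ r.length from by
        simp [List.length_cons]; ring]
      rw [countRange2]
      have hA : (List.range (2 ^ r.length)).countP
          (fun m => decide ((2 * (2 * m) + 1) * 2 &&& (2 * (2 * m) + 1) = 0)
            && P (bitsum (x :: y :: r) (2 * (2 * m) + 1)))
          = (nsums r).countP (fun s => P (x + s)) + (if P x then 1 else 0) := by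
        rw [List.countP_congr ?_]
        · exact ih2
        · intro m _
          rw [show 2 * (2 * m) + 1 = 4 * m + 1 from by ring,
              show (4 * m + 1) * 2 = 8 * m + 2 from by ring, land_8m2, bitsum_4m1]
          rw [decide_eq_decide.mpr
            (show 4 * ((2 * m) &&& m) = 0 ↔ m * 2 &&& m = 0 from by rw [Nat.mul_comm m 2]; omega)]
      have hB : (List.range (2 ^ r.length)).countP
          (fun m => decide ((2 * (2 * m + 1) + 1) * 2 &&& (2 * (2 * m + 1) + 1) = 0)
            && P (bitsum (x :: y :: r) (2 * (2 * m + 1) + 1))) = 0 := by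
        rw [List.countP_eq_zero]
        intro m _
        rw [show 2 * (2 * m + 1) + 1 = 4 * m + 3 from by ring]
        simp [noAdj_4m3 m]
      rw [hA, hB]
      omega
    rw [heven, hodd]
    rw [show nsums (x :: y :: r) = nsums (y :: r) ++ [x] ++ (nsums r).map (fun s => x + s) from rfl]
    rw [List.countP_append, List.countP_append, List.countP_map]
    simp only [Function.comp_def]
    rw [show ([x] : List Int).countP P = if P x then 1 else 0 from by
      rw [List.countP_cons]; simp]
    omega
termination_by v _ => v.length
decreasing_by all_goals (simp [List.length_cons]; try omega)

-- ===== VERDICT (by name: the statement is the Claim_ definition above) =====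
theorem find_comb_noncontig_spec : Claim_equal_find_comb_noncontig := by
  intro v t q _
  unfold Spec_find_comb_noncontig
  rw [A_eq, B_eq]
  have hm := master v (fun s => decide (t - q ≤ s ∧ s ≤ t + q))
  have hp : (2:Nat) ^ v.length = (2 ^ v.length - 1) + 1 := by
    have := Nat.two_pow_pos v.length
    omega
  rw [hp, List.range_succ_eq_map, List.countP_cons, List.countP_map] at hm
  simp only [Function.comp_def, Nat.succ_eq_add_one, bitsum_zero] at hm
  rw [show (decide ((0:Nat) * 2 &&& 0 = 0)) = true from by decide, Bool.true_and] at hm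
  simp only [QN]
  omega
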